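-- pv_equiv track=rewrite | github.com/Chagit-Werner/Python-Project | Task8.py | calculate_total_earnings
-- ===== SOURCE A (Python) =====
-- def calculate_total_earnings(purchase_list):
--     total_earnings = 0
--
--     for idx, customer in enumerate(purchase_list, start=1):
--         if idx % 8 == 0:
--             total_earnings += 200
--         else:
--             total_earnings += 50
--
--     return total_earnings
-- ===== SOURCE B (Python) =====
-- def calculate_total_earnings(purchase_list):
--     n = len(purchase_list)
--     return n * 50 + (n // 8) * 150
-- ===== Notes on version B (the rewrite author's own statement) =====
-- stated objective: faster
-- what changed: Replaced the per-customer loop with the closed form n*50 + (n//8)*150 (each 8th customer adds 150 extra on top of the base 50).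
import Mathlib
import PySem

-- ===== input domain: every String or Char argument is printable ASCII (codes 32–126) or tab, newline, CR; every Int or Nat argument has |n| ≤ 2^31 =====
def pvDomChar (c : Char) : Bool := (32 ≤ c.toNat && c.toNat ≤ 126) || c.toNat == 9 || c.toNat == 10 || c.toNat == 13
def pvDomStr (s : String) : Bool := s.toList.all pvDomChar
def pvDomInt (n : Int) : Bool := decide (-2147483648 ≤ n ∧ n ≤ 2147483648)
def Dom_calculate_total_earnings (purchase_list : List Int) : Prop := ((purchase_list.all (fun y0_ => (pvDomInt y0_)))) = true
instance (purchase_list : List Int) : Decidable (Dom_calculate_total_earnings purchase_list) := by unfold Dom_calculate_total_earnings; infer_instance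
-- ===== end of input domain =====

-- ===== PORT A =====
-- Literal port of A: fold over enumerate(purchase_list, start=1), +200 on every 8th index, else +50.
def calculate_total_earnings (purchase_list : List Int) : Int :=
  (PySem.List.enumerate purchase_list 1).foldl
    (fun total_earnings p =>
      if PySem.Int.mod p.1 8 == 0 then total_earnings + 200 else total_earnings + 50) 0

-- ===== PORT B =====
-- Port of B: closed form n*50 + (n//8)*150.
def calculate_total_earnings_alt (purchase_list : List Int) : Int :=
  (purchase_list.length : Int) * 50 + PySem.Int.floordiv (purchase_list.length : Int) 8 * 150

-- ===== PRECONDITION & SPEC =====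
def Spec_calculate_total_earnings (purchase_list : List Int) (out : Int) : Prop := out = calculate_total_earnings_alt purchase_list
instance (purchase_list : List Int) (out : Int) : Decidable (Spec_calculate_total_earnings purchase_list out) := by unfold Spec_calculate_total_earnings; infer_instance

-- ===== CLAIM (what is proved, stated in full; the proofs are below) =====
def Claim_equal_calculate_total_earnings : Prop := ∀ (purchase_list : List Int), Dom_calculate_total_earnings purchase_list → Spec_calculate_total_earnings purchase_list (calculate_total_earnings purchase_list)

-- ===== LEMMAS AND PROOFS =====

-- ===== VERDICT (by name: the statement is the Claim_ definition above) =====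
-- Loop invariant: the fold from start s ≥ 1 adds 50 per element plus 150 per multiple of 8 hit.
theorem cte_loop (xs : List Int) : ∀ (s acc : Int), 1 ≤ s →
    (PySem.List.enumerate xs s).foldl
      (fun total_earnings p =>
        if PySem.Int.mod p.1 8 == 0 then total_earnings + 200 else total_earnings + 50) acc
    = acc + 50 * xs.length + 150 * ((s - 1 + xs.length) / 8 - (s - 1) / 8) := by
  induction xs with
  | nil => intro s acc hs; simp
  | cons x xs ih =>
    intro s acc hs
    rw [PySem.List.enumerate_cons, List.foldl_cons, ih (s + 1) _ (by omega)]
    rw [(PySem.Int.mod_eq_emod_of_pos (by norm_num) : PySem.Int.mod s 8 = s % 8)]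
    simp only [beq_iff_eq, List.length_cons]
    split_ifs with h <;> push_cast <;> omega

theorem calculate_total_earnings_spec : Claim_equal_calculate_total_earnings := by
  intro xs _
  unfold Spec_calculate_total_earnings calculate_total_earnings calculate_total_earnings_alt
  rw [cte_loop xs 1 0 (by norm_num),
    (PySem.Int.floordiv_eq_ediv_of_pos (by norm_num) :
      PySem.Int.floordiv (xs.length : Int) 8 = (xs.length : Int) / 8)]
  omega
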